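-- pv_equiv track=rewrite | github.com/ThryB64/CornStudy | src/mais/study/professional.py | _feature_matches_source
-- ===== SOURCE A (Python) =====
-- _FRED_PREFIXES = ("fedfunds", "cpiaucns", "cpi_", "real_fed_rate")
--
-- _NASS_PREFIXES = ("area_planted", "area_harvested", "production_total", "yield_weighted",
--                   "yoy_production", "yoy_yield", "stocks_mar", "stocks_jun", "stocks_sep",
--                   "stocks_dec", "share_iowa", "share_illinois", "share_nebraska",
--                   "share_minnesota", "share_indiana", "share_south_dakota", "share_kansas",
--                   "share_ohio", "share_wisconsin", "share_missouri")
--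
-- def _feature_matches_source(col: str, source: str, expected_group: str) -> bool:
--     if source == "cbot_corn":
--         return col.startswith("corn_")
--     if source in {"cbot_wheat", "cbot_soy", "nymex_crude_wti", "nymex_natgas", "ice_dxy"}:
--         labels = {
--             "cbot_wheat": "wheat",
--             "cbot_soy": "soy",
--             "nymex_crude_wti": "oil",
--             "nymex_natgas": "gas",
--             "ice_dxy": "dxy",
--         }
--         return labels[source] in col
--     if source == "fred_macro":
--         return any(col.startswith(p) for p in _FRED_PREFIXES)
--     if source in {"usda_nass_yield_state", "usda_nass_crop_progress", "usda_nass_crop_condition"}: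
--         return any(col.startswith(p) for p in _NASS_PREFIXES)
--     return col.startswith(expected_group)
-- ===== SOURCE B (Python) =====
-- _FRED_PREFIXES = ("fedfunds", "cpiaucns", "cpi_", "real_fed_rate")
--
-- _NASS_PREFIXES = ("area_planted", "area_harvested", "production_total", "yield_weighted",
--                   "yoy_production", "yoy_yield", "stocks_mar", "stocks_jun", "stocks_sep",
--                   "stocks_dec", "share_iowa", "share_illinois", "share_nebraska",
--                   "share_minnesota", "share_indiana", "share_south_dakota", "share_kansas",
--                   "share_ohio", "share_wisconsin", "share_missouri")
--
-- # Flat rule table: (source, pattern, anchored). A single scan over it with two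
-- # accumulators replaces A's if/elif dispatch; str.find is the one matching
-- # primitive (anchored: occurrence at index 0; unanchored: any occurrence).
-- _RULES = (
--     [("cbot_corn", "corn_", True),
--      ("cbot_wheat", "wheat", False),
--      ("cbot_soy", "soy", False),
--      ("nymex_crude_wti", "oil", False),
--      ("nymex_natgas", "gas", False),
--      ("ice_dxy", "dxy", False)]
--     + [("fred_macro", p, True) for p in _FRED_PREFIXES]
--     + [(s, p, True)
--        for s in ("usda_nass_yield_state", "usda_nass_crop_progress", "usda_nass_crop_condition")
--        for p in _NASS_PREFIXES]
-- )
--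
-- def _feature_matches_source(col: str, source: str, expected_group: str) -> bool:
--     known = False
--     hit = False
--     for src, pat, anchored in _RULES:
--         if src == source:
--             known = True
--             i = col.find(pat)
--             if i == 0 or (not anchored and i >= 0):
--                 hit = True
--     return hit if known else col.startswith(expected_group)
-- ===== Notes on version B (the rewrite author's own statement) =====
-- stated objective: alternative
-- what changed: A's if/elif dispatch (prefix, substring and any-prefix branches plus an inner labels dict) is replaced by a single linear scan over one flat (source, pattern, anchored) rule table with two accumulators (known, hit), using str.find as the sole matching primitive and falling back to the expected_group prefix when no rule's source matched.
import Mathlib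
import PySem

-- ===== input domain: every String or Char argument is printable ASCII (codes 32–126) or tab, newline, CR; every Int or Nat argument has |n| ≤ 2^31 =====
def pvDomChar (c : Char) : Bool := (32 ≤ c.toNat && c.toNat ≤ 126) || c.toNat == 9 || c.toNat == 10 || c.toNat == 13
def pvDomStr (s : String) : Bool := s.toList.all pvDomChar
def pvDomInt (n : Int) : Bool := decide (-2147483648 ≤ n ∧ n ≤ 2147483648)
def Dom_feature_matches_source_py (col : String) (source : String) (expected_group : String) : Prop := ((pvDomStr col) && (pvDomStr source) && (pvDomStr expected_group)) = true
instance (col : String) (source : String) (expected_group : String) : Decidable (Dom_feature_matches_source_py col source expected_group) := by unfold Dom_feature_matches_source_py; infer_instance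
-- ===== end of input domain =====

-- B replaces A's if/elif dispatch by one flat (source, pattern, anchored) rule table scanned
-- in a single pass with two accumulators, using str.find as the sole matching primitive;
-- objective: alternative decomposition, same cost.


-- ===== PORT A =====
def fredPrefixes : List String := ["fedfunds", "cpiaucns", "cpi_", "real_fed_rate"]

def nassPrefixes : List String :=
  ["area_planted", "area_harvested", "production_total", "yield_weighted",
   "yoy_production", "yoy_yield", "stocks_mar", "stocks_jun", "stocks_sep",
   "stocks_dec", "share_iowa", "share_illinois", "share_nebraska",
   "share_minnesota", "share_indiana", "share_south_dakota", "share_kansas",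
   "share_ohio", "share_wisconsin", "share_missouri"]

def feature_matches_source_py (col : String) (source : String) (expected_group : String) : Bool :=
  if source = "cbot_corn" then PySem.Str.startswith col "corn_"
  else if source ∈ (["cbot_wheat", "cbot_soy", "nymex_crude_wti", "nymex_natgas", "ice_dxy"] : List String) then
    -- labels[source]: the key is guaranteed present by the membership test above,
    -- so the KeyError branch is unreachable; getD "" is exact here.
    let labels : PySem.Dict String String :=
      PySem.Dict.ofList [("cbot_wheat", "wheat"), ("cbot_soy", "soy"),
        ("nymex_crude_wti", "oil"), ("nymex_natgas", "gas"), ("ice_dxy", "dxy")]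
    PySem.Str.isIn (labels.getD source "") col
  else if source = "fred_macro" then
    fredPrefixes.any (fun p => PySem.Str.startswith col p)
  else if source ∈ (["usda_nass_yield_state", "usda_nass_crop_progress", "usda_nass_crop_condition"] : List String) then
    nassPrefixes.any (fun p => PySem.Str.startswith col p)
  else PySem.Str.startswith col expected_group

-- ===== PORT B =====
-- Flat rule table (source, pattern, anchored), built as in Source B.
def featRules : List (String × String × Bool) :=
  [("cbot_corn", "corn_", true),
   ("cbot_wheat", "wheat", false),
   ("cbot_soy", "soy", false),
   ("nymex_crude_wti", "oil", false),
   ("nymex_natgas", "gas", false),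
   ("ice_dxy", "dxy", false)]
  ++ fredPrefixes.map (fun p => ("fred_macro", p, true))
  ++ (["usda_nass_yield_state", "usda_nass_crop_progress", "usda_nass_crop_condition"] : List String).flatMap
       (fun s => nassPrefixes.map (fun p => (s, p, true)))

def feature_matches_source_py_alt (col : String) (source : String) (expected_group : String) : Bool :=
  -- single pass with accumulators (known, hit), as in Source B's for-loop
  let st := featRules.foldl
    (fun (st : Bool × Bool) r =>
      if r.1 = source then
        let i := PySem.Str.find col r.2.1
        (true, if i == 0 || (!r.2.2 && decide (0 ≤ i)) then true else st.2)
      else st)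
    (false, false)
  if st.1 then st.2 else PySem.Str.startswith col expected_group

-- ===== PRECONDITION & SPEC =====
def Spec_feature_matches_source_py (col : String) (source : String) (expected_group : String) (out : Bool) : Prop := out = feature_matches_source_py_alt col source expected_group
instance (col : String) (source : String) (expected_group : String) (out : Bool) : Decidable (Spec_feature_matches_source_py col source expected_group out) := by unfold Spec_feature_matches_source_py; infer_instance

-- ===== CLAIM (what is proved, stated in full; the proofs are below) =====
def Claim_equal_feature_matches_source_py : Prop := ∀ (col : String) (source : String) (expected_group : String), Dom_feature_matches_source_py col source expected_group → Spec_feature_matches_source_py col source expected_group (feature_matches_source_py col source expected_group)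

-- ===== LEMMAS AND PROOFS =====

-- anchored rule: "col.find(p) == 0" is exactly startswith (first occurrence at index 0)
theorem startswith_eq_find_zero (col p : List Char) :
    PySem.Chars.startswith col p = (PySem.Chars.find col p == 0) := by
  by_cases hpre : p <+: col
  · have hnn : 0 ≤ PySem.Chars.find col p :=
      (PySem.Chars.find_nonneg_iff _ _).mpr hpre.isInfix
    have hspec := PySem.Chars.find_spec (s := col) (sub := p) hnn
    have h0 : PySem.Chars.find col p = 0 := by
      by_contra hne
      exact hspec.2 0 (by omega) (by simpa using hpre)
    simp [h0, (PySem.Chars.startswith_iff _ _).mpr hpre]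
  · have hne : PySem.Chars.find col p ≠ 0 := by
      intro h0
      have hspec := PySem.Chars.find_spec (s := col) (sub := p) (by omega)
      exact hpre (by simpa [h0] using hspec.1)
    have hsw : PySem.Chars.startswith col p = false :=
      Bool.eq_false_iff.mpr (fun ht => hpre ((PySem.Chars.startswith_iff _ _).mp ht))
    simp [hsw, hne]

-- unanchored rule: "col.find(p) == 0 or col.find(p) >= 0" is exactly "p in col"
theorem isIn_eq_find (col p : List Char) :
    PySem.Chars.isIn p col =
      ((PySem.Chars.find col p == 0) || decide (0 ≤ PySem.Chars.find col p)) := by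
  by_cases hin : p <:+: col
  · have : 0 ≤ PySem.Chars.find col p := (PySem.Chars.find_nonneg_iff _ _).mpr hin
    simp [this, (PySem.Chars.isIn_iff_infix _ _).mpr hin]
  · have hneg : ¬ 0 ≤ PySem.Chars.find col p := by
      rw [PySem.Chars.find_nonneg_iff]; exact hin
    have h0 : PySem.Chars.find col p ≠ 0 := by omega
    have : PySem.Chars.isIn p col = false :=
      Bool.eq_false_iff.mpr (fun ht => hin ((PySem.Chars.isIn_iff_infix _ _).mp ht))
    simp [this, h0, hneg]

-- ===== VERDICT (by name: the statement is the Claim_ definition above) =====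
theorem feature_matches_source_py_spec : Claim_equal_feature_matches_source_py := by
  intro col source expected_group _
  unfold Spec_feature_matches_source_py feature_matches_source_py feature_matches_source_py_alt featRules
  by_cases h1 : source = "cbot_corn"
  · subst h1; simp [fredPrefixes, nassPrefixes, startswith_eq_find_zero, beq_eq_decide]
  by_cases h2 : source = "cbot_wheat"
  · subst h2; simp [fredPrefixes, nassPrefixes, PySem.Dict.getD, PySem.Dict.get?, isIn_eq_find, beq_eq_decide]; ac_rfl
  by_cases h3 : source = "cbot_soy"
  · subst h3; simp [fredPrefixes, nassPrefixes, PySem.Dict.getD, PySem.Dict.get?, isIn_eq_find, beq_eq_decide]; ac_rfl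
  by_cases h4 : source = "nymex_crude_wti"
  · subst h4; simp [fredPrefixes, nassPrefixes, PySem.Dict.getD, PySem.Dict.get?, isIn_eq_find, beq_eq_decide]; ac_rfl
  by_cases h5 : source = "nymex_natgas"
  · subst h5; simp [fredPrefixes, nassPrefixes, PySem.Dict.getD, PySem.Dict.get?, isIn_eq_find, beq_eq_decide]; ac_rfl
  by_cases h6 : source = "ice_dxy"
  · subst h6; simp [fredPrefixes, nassPrefixes, PySem.Dict.getD, PySem.Dict.get?, isIn_eq_find, beq_eq_decide]; ac_rfl
  by_cases h7 : source = "fred_macro"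
  · subst h7; simp [fredPrefixes, nassPrefixes, startswith_eq_find_zero, beq_eq_decide]; ac_rfl
  by_cases h8 : source = "usda_nass_yield_state"
  · subst h8; simp [fredPrefixes, nassPrefixes, startswith_eq_find_zero, beq_eq_decide]; ac_rfl
  by_cases h9 : source = "usda_nass_crop_progress"
  · subst h9; simp [fredPrefixes, nassPrefixes, startswith_eq_find_zero, beq_eq_decide]; ac_rfl
  by_cases h10 : source = "usda_nass_crop_condition"
  · subst h10; simp [fredPrefixes, nassPrefixes, startswith_eq_find_zero, beq_eq_decide]; ac_rfl
  simp [fredPrefixes, nassPrefixes, h1, h2, h3, h4, h5, h6, h7, h8, h9, h10,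
    Ne.symm h1, Ne.symm h2, Ne.symm h3, Ne.symm h4, Ne.symm h5, Ne.symm h6,
    Ne.symm h7, Ne.symm h8, Ne.symm h9, Ne.symm h10]
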